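-- pv_equiv track=rewrite | github.com/fangjingyan/Sprout_exercising_time | exercise_time.py | exercise_time
-- ===== SOURCE A (Python) =====
-- def exercise_time(ts, hr, min_hr, interval=120):
--     '''
--     :param ts: time step after midnight
--     :param hr: corresponding heart rate
--     :param min_hr: the minial heart rate for exercising
--     :param interval: the maximum interval allowing the user to take off the watch
--     :return: total exercising time
--     '''
--     # the length of the array
--     n = len(ts)
--     res = 0
--     i = 0
--     while i < n:
--         # find the start index of potential exercising time in ts array
--         while i < n and hr[i] < min_hr:
--             i += 1
--         j = i + 1
--         while j < n:
--             if hr[j] >= min_hr and ts[j] - ts[j - 1] <= interval: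
--                 res += ts[j] - ts[j - 1]
--                 j += 1
--             else:
--                 break
--         i = j
--     return res
-- ===== SOURCE B (Python) =====
-- def exercise_time(ts, hr, min_hr, interval=120):
--     # One flat pass: each adjacent pair contributes independently.
--     return sum(ts[k] - ts[k - 1]
--                for k in range(1, len(ts))
--                if hr[k - 1] >= min_hr and hr[k] >= min_hr
--                and ts[k] - ts[k - 1] <= interval)
-- ===== Notes on version B (the rewrite author's own statement) =====
-- stated objective: simpler
-- what changed: Replaced A's nested two-pointer while-loops (skip-low scan, segment scan, i=j resets) with one flat sum over adjacent pairs, adding ts[k]-ts[k-1] whenever hr[k-1]>=min_hr, hr[k]>=min_hr and the gap is within interval.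
import Mathlib
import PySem

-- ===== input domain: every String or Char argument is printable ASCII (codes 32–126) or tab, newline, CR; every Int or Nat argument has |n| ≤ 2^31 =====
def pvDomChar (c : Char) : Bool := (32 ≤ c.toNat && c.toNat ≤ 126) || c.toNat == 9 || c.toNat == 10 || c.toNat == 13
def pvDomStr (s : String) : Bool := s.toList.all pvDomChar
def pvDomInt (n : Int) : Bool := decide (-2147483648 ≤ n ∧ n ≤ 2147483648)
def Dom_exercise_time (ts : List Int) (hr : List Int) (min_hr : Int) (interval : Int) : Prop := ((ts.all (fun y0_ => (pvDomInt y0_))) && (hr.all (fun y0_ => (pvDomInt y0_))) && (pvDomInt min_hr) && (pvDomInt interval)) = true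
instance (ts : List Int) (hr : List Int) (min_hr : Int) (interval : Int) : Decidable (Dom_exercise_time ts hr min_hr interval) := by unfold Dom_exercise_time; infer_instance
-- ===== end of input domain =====

-- B replaces A's nested two-pointer while-loops by one flat sum over adjacent pairs (objective: simpler).

-- shared indexing helper: xs[i] (in-range on Pre_; default 0 outside, where Python raises)
def pvGet (xs : List Int) (i : Int) : Int := (PySem.List.pyGet? xs i).getD 0

-- ===== PORT A =====
-- inner 'while i < n and hr[i] < min_hr: i += 1'
def pvSkip (hr : List Int) (min_hr : Int) (n i : Nat) : Nat :=
  if i < n then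
    if pvGet hr i < min_hr then pvSkip hr min_hr n (i + 1) else i
  else i
termination_by n - i

theorem pvSkip_ge (hr : List Int) (min_hr : Int) (n i : Nat) :
    i ≤ pvSkip hr min_hr n i := by
  unfold pvSkip
  split
  · split
    · exact le_trans (Nat.le_succ i) (pvSkip_ge hr min_hr n (i + 1))
    · exact le_refl i
  · exact le_refl i
termination_by n - i

-- inner 'while j < n: if …: res += …; j += 1 else: break'
def pvInner (ts hr : List Int) (min_hr interval : Int) (n j : Nat) (res : Int) : Nat × Int :=
  if j < n then
    if pvGet hr (j : Int) ≥ min_hr ∧ pvGet ts (j : Int) - pvGet ts ((j : Int) - 1) ≤ interval then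
      pvInner ts hr min_hr interval n (j + 1) (res + (pvGet ts (j : Int) - pvGet ts ((j : Int) - 1)))
    else (j, res)
  else (j, res)
termination_by n - j

theorem pvInner_ge (ts hr : List Int) (min_hr interval : Int) (n j : Nat) (res : Int) :
    j ≤ (pvInner ts hr min_hr interval n j res).1 := by
  unfold pvInner
  split
  · split
    · exact le_trans (Nat.le_succ j) (pvInner_ge ts hr min_hr interval n (j + 1) _)
    · exact le_refl j
  · exact le_refl j
termination_by n - j

-- outer 'while i < n'
def pvOuter (ts hr : List Int) (min_hr interval : Int) (n i : Nat) (res : Int) : Int :=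
  if _h : i < n then
    let i2 := pvSkip hr min_hr n i
    let p := pvInner ts hr min_hr interval n (i2 + 1) res
    pvOuter ts hr min_hr interval n p.1 p.2
  else res
termination_by n - i
decreasing_by
  have h1 : i ≤ pvSkip hr min_hr n i := pvSkip_ge hr min_hr n i
  have h2 : pvSkip hr min_hr n i + 1 ≤ (pvInner ts hr min_hr interval n (pvSkip hr min_hr n i + 1) res).1 :=
    pvInner_ge ts hr min_hr interval n _ res
  omega

def exercise_time (ts : List Int) (hr : List Int) (min_hr : Int) (interval : Int) : Int :=
  pvOuter ts hr min_hr interval ts.length 0 0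

-- ===== PORT B =====
-- sum(ts[k]-ts[k-1] for k in range(1, len(ts)) if hr[k-1]>=min_hr and hr[k]>=min_hr and ts[k]-ts[k-1]<=interval)
def exercise_time_alt (ts : List Int) (hr : List Int) (min_hr : Int) (interval : Int) : Int :=
  (PySem.List.pyRange 1 (ts.length : Int) 1).foldl
    (fun acc k =>
      if pvGet hr (k - 1) ≥ min_hr ∧ pvGet hr k ≥ min_hr ∧ pvGet ts k - pvGet ts (k - 1) ≤ interval then
        acc + (pvGet ts k - pvGet ts (k - 1))
      else acc)
    0

-- ===== PRECONDITION & SPEC =====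
-- Pre_ excludes exactly the inputs where Python A raises IndexError: hr shorter than ts.
def Pre_exercise_time (ts : List Int) (hr : List Int) (min_hr : Int) (interval : Int) : Prop :=
  ts.length ≤ hr.length
instance (ts : List Int) (hr : List Int) (min_hr : Int) (interval : Int) : Decidable (Pre_exercise_time ts hr min_hr interval) := by unfold Pre_exercise_time; infer_instance

def pvWitness_exercise_time : List Int × List Int × Int × Int := ([0, 60, 200], [90, 95, 99], 80, 120)

def Spec_exercise_time (ts : List Int) (hr : List Int) (min_hr : Int) (interval : Int) (out : Int) : Prop := out = exercise_time_alt ts hr min_hr interval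
instance (ts : List Int) (hr : List Int) (min_hr : Int) (interval : Int) (out : Int) : Decidable (Spec_exercise_time ts hr min_hr interval out) := by unfold Spec_exercise_time; infer_instance

-- ===== CLAIM (what is proved, stated in full; the proofs are below) =====
def Claim_equal_exercise_time : Prop := ∀ (ts : List Int) (hr : List Int) (min_hr : Int) (interval : Int), Dom_exercise_time ts hr min_hr interval → Pre_exercise_time ts hr min_hr interval → Spec_exercise_time ts hr min_hr interval (exercise_time ts hr min_hr interval)

-- ===== LEMMAS AND PROOFS =====

-- the contribution of the adjacent pair (k-1, k)
def pvG (ts hr : List Int) (min_hr interval : Int) (k : Int) : Int :=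
  if pvGet hr (k - 1) ≥ min_hr ∧ pvGet hr k ≥ min_hr ∧ pvGet ts k - pvGet ts (k - 1) ≤ interval then
    pvGet ts k - pvGet ts (k - 1)
  else 0

-- sum of pvG over k = j, j+1, …, n-1
def pvTail (ts hr : List Int) (min_hr interval : Int) (n j : Nat) : Int :=
  if j < n then pvG ts hr min_hr interval (j : Int) + pvTail ts hr min_hr interval n (j + 1) else 0
termination_by n - j

theorem pvTail_of_ge (ts hr : List Int) (min_hr interval : Int) (n j : Nat) (h : n ≤ j) :
    pvTail ts hr min_hr interval n j = 0 := by
  unfold pvTail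
  simp [Nat.not_lt.mpr h]

-- B's fold equals acc + pvTail, for any start a
theorem pvFold_eq_tail (ts hr : List Int) (min_hr interval : Int) (n a : Nat) (acc : Int) :
    (PySem.List.pyRange (a : Int) (n : Int) 1).foldl
      (fun acc k =>
        if pvGet hr (k - 1) ≥ min_hr ∧ pvGet hr k ≥ min_hr ∧ pvGet ts k - pvGet ts (k - 1) ≤ interval then
          acc + (pvGet ts k - pvGet ts (k - 1))
        else acc)
      acc = acc + pvTail ts hr min_hr interval n a := by
  by_cases h : a < n
  · rw [PySem.List.pyRange_one_cons (by exact_mod_cast h)]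
    rw [List.foldl_cons]
    have hcast : ((a : Int) + 1) = ((a + 1 : Nat) : Int) := by push_cast; ring
    rw [hcast, pvFold_eq_tail ts hr min_hr interval n (a + 1)]
    conv_rhs => rw [pvTail]
    rw [if_pos h]
    unfold pvG
    by_cases hc : pvGet hr ((a : Int) - 1) ≥ min_hr ∧ pvGet hr (a : Int) ≥ min_hr ∧ pvGet ts (a : Int) - pvGet ts ((a : Int) - 1) ≤ interval
    · rw [if_pos hc, if_pos hc]; ring
    · rw [if_neg hc, if_neg hc]; ring
  · have : (PySem.List.pyRange (a : Int) (n : Int) 1) = [] := by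
      rw [PySem.List.pyRange_one]
      have : ((n : Int) - (a : Int)).toNat = 0 := by omega
      simp [this]
    rw [this, pvTail_of_ge ts hr min_hr interval n a (Nat.le_of_not_lt h)]
    simp
termination_by n - a

-- positions strictly before pvSkip's result have low heart rate
theorem pvSkip_low (hr : List Int) (min_hr : Int) (n i k : Nat) (hik : i ≤ k)
    (hk : k < pvSkip hr min_hr n i) : pvGet hr (k : Int) < min_hr := by
  unfold pvSkip at hk
  split at hk
  · split at hk
    · rcases Nat.eq_or_lt_of_le hik with heq | hlt
      · subst heq; assumption
      · exact pvSkip_low hr min_hr n (i + 1) k hlt hk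
    · omega
  · omega
termination_by n - i

theorem pvSkip_high (hr : List Int) (min_hr : Int) (n i : Nat)
    (h : pvSkip hr min_hr n i < n) : min_hr ≤ pvGet hr ((pvSkip hr min_hr n i : Nat) : Int) := by
  unfold pvSkip at h ⊢
  split at h
  · split at h
    · next h1 h2 =>
      simp only [if_pos h1, if_pos h2]
      exact pvSkip_high hr min_hr n (i + 1) h
    · next h1 h2 =>
      simp only [if_pos h1, if_neg h2]
      omega
  · next h1 => omega
termination_by n - i

-- pvTail is unchanged across a stretch of low heart rates: pvG vanishes there
theorem pvG_zero_of_low (ts hr : List Int) (min_hr interval : Int) (k : Int)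
    (h : pvGet hr (k - 1) < min_hr) : pvG ts hr min_hr interval k = 0 := by
  unfold pvG
  rw [if_neg]
  intro hc
  omega

theorem pvG_zero_of_break (ts hr : List Int) (min_hr interval : Int) (k : Int)
    (h : ¬ (pvGet hr k ≥ min_hr ∧ pvGet ts k - pvGet ts (k - 1) ≤ interval)) :
    pvG ts hr min_hr interval k = 0 := by
  unfold pvG
  rw [if_neg]
  intro hc
  exact h ⟨hc.2.1, hc.2.2⟩

theorem pvTail_step_zero (ts hr : List Int) (min_hr interval : Int) (n j : Nat)
    (h : pvG ts hr min_hr interval (j : Int) = 0) :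
    pvTail ts hr min_hr interval n j = pvTail ts hr min_hr interval n (j + 1) := by
  conv_lhs => rw [pvTail]
  split
  · rw [h]; ring
  · rw [pvTail_of_ge ts hr min_hr interval n (j + 1) (by omega)]

theorem pvTail_skip (ts hr : List Int) (min_hr interval : Int) (n a b : Nat) (hab : a ≤ b)
    (hlow : ∀ k : Nat, a ≤ k → k < b → pvGet hr (k : Int) < min_hr) :
    pvTail ts hr min_hr interval n (a + 1) = pvTail ts hr min_hr interval n (b + 1) := by
  rcases Nat.eq_or_lt_of_le hab with heq | hlt
  · rw [heq]
  · have h0 : pvG ts hr min_hr interval ((a + 1 : Nat) : Int) = 0 := by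
      apply pvG_zero_of_low
      have : ((a + 1 : Nat) : Int) - 1 = (a : Int) := by push_cast; ring
      rw [this]
      exact hlow a (le_refl a) hlt
    rw [pvTail_step_zero ts hr min_hr interval n (a + 1) h0]
    exact pvTail_skip ts hr min_hr interval n (a + 1) b hlt
      (fun k hk1 hk2 => hlow k (by omega) hk2)
termination_by b - a

-- the inner while loop: consumes exactly the pvTail contributions between j and its exit
theorem pvInner_spec (ts hr : List Int) (min_hr interval : Int) (n j : Nat) (res : Int)
    (hprev : min_hr ≤ pvGet hr ((j : Int) - 1)) :
    (pvInner ts hr min_hr interval n j res).2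
      + pvTail ts hr min_hr interval n ((pvInner ts hr min_hr interval n j res).1 + 1)
      = res + pvTail ts hr min_hr interval n j := by
  unfold pvInner
  split
  · next hjn =>
    split
    · next hc =>
      have hnext : min_hr ≤ pvGet hr (((j + 1 : Nat) : Int) - 1) := by
        have : ((j + 1 : Nat) : Int) - 1 = (j : Int) := by push_cast; ring
        rw [this]; exact hc.1
      have ih := pvInner_spec ts hr min_hr interval n (j + 1)
        (res + (pvGet ts (j : Int) - pvGet ts ((j : Int) - 1))) hnext
      rw [ih]
      have hg : pvG ts hr min_hr interval (j : Int) = pvGet ts (j : Int) - pvGet ts ((j : Int) - 1) := by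
        unfold pvG
        rw [if_pos ⟨hprev, hc.1, hc.2⟩]
      conv_rhs => rw [pvTail, if_pos hjn, hg]
      ring
    · next hc =>
      simp only
      rw [pvTail_step_zero ts hr min_hr interval n j (pvG_zero_of_break ts hr min_hr interval _ hc)]
  · next hjn =>
    simp only
    rw [pvTail_of_ge ts hr min_hr interval n j (Nat.le_of_not_lt hjn),
        pvTail_of_ge ts hr min_hr interval n (j + 1) (by omega)]
termination_by n - j

-- the outer while loop equals res + remaining flat sum
theorem pvOuter_spec (ts hr : List Int) (min_hr interval : Int) (n i : Nat) (res : Int) :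
    pvOuter ts hr min_hr interval n i res = res + pvTail ts hr min_hr interval n (i + 1) := by
  unfold pvOuter
  split
  · next hin =>
    simp only
    set i2 := pvSkip hr min_hr n i with hi2
    have hskip : pvTail ts hr min_hr interval n (i + 1) = pvTail ts hr min_hr interval n (i2 + 1) :=
      pvTail_skip ts hr min_hr interval n i i2 (pvSkip_ge hr min_hr n i)
        (fun k hk1 hk2 => pvSkip_low hr min_hr n i k hk1 hk2)
    rw [hskip]
    by_cases hi2n : i2 + 1 ≤ n
    · rcases Nat.eq_or_lt_of_le hi2n with heq | hlt
      · -- i2 + 1 = n possible with i2 < n, still fine: uniform argument below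
        have hprev : min_hr ≤ pvGet hr (((i2 + 1 : Nat) : Int) - 1) := by
          have : ((i2 + 1 : Nat) : Int) - 1 = (i2 : Int) := by push_cast; ring
          rw [this]
          exact pvSkip_high hr min_hr n i (by omega)
        have hinner := pvInner_spec ts hr min_hr interval n (i2 + 1) res hprev
        have ih := pvOuter_spec ts hr min_hr interval n
          (pvInner ts hr min_hr interval n (i2 + 1) res).1
          (pvInner ts hr min_hr interval n (i2 + 1) res).2
        rw [ih]
        omega
      · have hprev : min_hr ≤ pvGet hr (((i2 + 1 : Nat) : Int) - 1) := by
          have : ((i2 + 1 : Nat) : Int) - 1 = (i2 : Int) := by push_cast; ring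
          rw [this]
          exact pvSkip_high hr min_hr n i (by omega)
        have hinner := pvInner_spec ts hr min_hr interval n (i2 + 1) res hprev
        have ih := pvOuter_spec ts hr min_hr interval n
          (pvInner ts hr min_hr interval n (i2 + 1) res).1
          (pvInner ts hr min_hr interval n (i2 + 1) res).2
        rw [ih]
        omega
    · -- i2 ≥ n: the inner loop returns immediately and the remaining tail is empty
      have hret : pvInner ts hr min_hr interval n (i2 + 1) res = (i2 + 1, res) := by
        unfold pvInner
        rw [if_neg (by omega)]
      have ih := pvOuter_spec ts hr min_hr interval n
        (pvInner ts hr min_hr interval n (i2 + 1) res).1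
        (pvInner ts hr min_hr interval n (i2 + 1) res).2
      rw [ih, hret]
      simp only
      rw [pvTail_of_ge ts hr min_hr interval n (i2 + 1 + 1) (by omega),
          pvTail_of_ge ts hr min_hr interval n (i2 + 1) (by omega)]
  · next hin =>
    rw [pvTail_of_ge ts hr min_hr interval n (i + 1) (by omega)]
    ring
termination_by n - i
decreasing_by
  all_goals
    have h1 : i ≤ pvSkip hr min_hr n i := pvSkip_ge hr min_hr n i
    have h2 : pvSkip hr min_hr n i + 1 ≤ (pvInner ts hr min_hr interval n (pvSkip hr min_hr n i + 1) res).1 :=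
      pvInner_ge ts hr min_hr interval n _ res
    omega

-- ===== VERDICT (by name: the statement is the Claim_ definition above) =====
theorem exercise_time_spec : Claim_equal_exercise_time := by
  intro ts hr min_hr interval _hdom _hpre
  unfold Spec_exercise_time exercise_time exercise_time_alt
  rw [pvOuter_spec]
  have h := pvFold_eq_tail ts hr min_hr interval ts.length 1 0
  norm_num at h ⊢
  rw [h]
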